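-- pv_equiv track=rewrite | github.com/Adefioye/DSA-PREP | Data-structures/arrays/dfs-2d-arrays.py | dfs2DTraversal
-- ===== SOURCE A (Python) =====
-- directions = [(-1, 0), (0, 1), (1, 0), (0, -1)]
--
-- def dfs2DTraversal(matrix):
--     ROWS = len(matrix)
--     COLS = len(matrix[0])
--
--     # seen = [[False] * COLS  for _ in range(ROWS)]
--     visited = set()
--     values = []
--
--     def dfs(matrix, row, col,):
--
--         if row < 0 or row >= ROWS or col < 0 or col >= COLS or (row, col) in visited:
--             return
--
--         values.append(matrix[row][col])
--         visited.add((row, col))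
--                 # Up, Right, Down, Left
--         for r, c in directions:
--
--             dfs(matrix, row + r, col + c)
--
--
--     dfs(matrix, 0, 0)
--
--     return values
-- ===== SOURCE B (Python) =====
-- def dfs2DTraversal(matrix):
--     ROWS = len(matrix)
--     COLS = len(matrix[0])
--     visited = set()
--     values = []
--     stack = [(0, 0)]
--     while stack:
--         row, col = stack.pop()
--         if row < 0 or row >= ROWS or col < 0 or col >= COLS or (row, col) in visited:
--             continue
--         values.append(matrix[row][col])
--         visited.add((row, col))
--         # push reversed direction order (Left, Down, Right, Up) so Up is processed first
--         stack.append((row, col - 1))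
--         stack.append((row + 1, col))
--         stack.append((row, col + 1))
--         stack.append((row - 1, col))
--     return values
-- ===== Notes on version B (the rewrite author's own statement) =====
-- stated objective: faster
-- what changed: The recursive DFS with a nested closure is replaced by an iterative explicit-stack loop (visited-check at pop, the four neighbours pushed in reverse direction order) that produces the identical preorder without recursion.
import Mathlib
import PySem

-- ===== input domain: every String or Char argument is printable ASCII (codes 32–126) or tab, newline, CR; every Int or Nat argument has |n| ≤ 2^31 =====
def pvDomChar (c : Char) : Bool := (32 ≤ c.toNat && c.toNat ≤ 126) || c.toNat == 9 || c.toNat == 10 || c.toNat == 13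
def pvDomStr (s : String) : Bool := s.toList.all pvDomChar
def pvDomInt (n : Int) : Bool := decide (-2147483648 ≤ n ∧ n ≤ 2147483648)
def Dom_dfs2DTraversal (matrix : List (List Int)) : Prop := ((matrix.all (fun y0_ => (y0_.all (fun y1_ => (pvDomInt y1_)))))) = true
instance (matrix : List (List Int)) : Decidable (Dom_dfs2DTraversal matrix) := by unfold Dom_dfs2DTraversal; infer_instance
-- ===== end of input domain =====

-- B replaces the recursive DFS by an iterative explicit-stack loop (visited-check at pop,
-- neighbours pushed in reverse order), producing the identical preorder without the
-- per-cell recursive call overhead; objective: faster (constant factor, as measured).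

-- ===== PORT A =====
-- module constant 'directions'
def pvDirs : List (Int × Int) := [(-1, 0), (0, 1), (1, 0), (0, -1)]

-- inner recursive 'dfs'; the Nat fuel only makes the recursion total: Python's recursion depth is
-- bounded by #visited + 1 ≤ ROWS*COLS + 1 (each non-leaf level adds a distinct in-bounds cell to
-- visited), and a call at fuel 0 could only be a cell whose guard fails, where Python also returns
-- with the state unchanged.
def pvDfsA (matrix : List (List Int)) (ROWS COLS : Int) :
    Nat → Int → Int → PySem.Set (Int × Int) × List Int → PySem.Set (Int × Int) × List Int
  | 0, _, _, st => st
  | fuel + 1, row, col, st =>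
    if row < 0 ∨ ROWS ≤ row ∨ col < 0 ∨ COLS ≤ col ∨ (row, col) ∈ st.1 then st
    else
      pvDirs.foldl
        (fun s rc => pvDfsA matrix ROWS COLS fuel (row + rc.1) (col + rc.2) s)
        (PySem.Set.add st.1 (row, col),
         st.2 ++ [PySem.List.pyGetD (PySem.List.pyGetD matrix row []) col 0])

def dfs2DTraversal (matrix : List (List Int)) : List Int :=
  let ROWS : Int := matrix.length
  let COLS : Int := (PySem.List.pyGetD matrix 0 []).length   -- len(matrix[0]); raises iff matrix = [] (excluded by Pre_)
  (pvDfsA matrix ROWS COLS (matrix.length * (PySem.List.pyGetD matrix 0 []).length + 1)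
      0 0 (PySem.Set.empty, [])).2

-- ===== PORT B =====
-- all in-bounds cells, and the number of them not yet visited (the loop's termination measure)
def pvCells (R C : Int) : List (Int × Int) :=
  (List.range R.toNat).flatMap (fun i => (List.range C.toNat).map (fun j => ((i : Int), (j : Int))))

def pvUnvis (R C : Int) (visited : PySem.Set (Int × Int)) : Nat :=
  (pvCells R C).countP (fun p => decide (p ∉ visited))

-- termination helpers for the while loop (cited by decreasing_by below)
theorem pvCountP_lt {α : Type} (l : List α) (p q : α → Bool)
    (hmono : ∀ x, p x = true → q x = true) (c : α) (hc : c ∈ l)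
    (hq : q c = true) (hp : p c = false) :
    l.countP p < l.countP q := by
  induction l with
  | nil => cases hc
  | cons x xs ih =>
    simp only [List.countP_cons]
    rcases List.mem_cons.mp hc with h | h
    · subst h
      have hmle : xs.countP p ≤ xs.countP q := List.countP_mono_left (fun x _ => hmono x)
      simp [hp, hq]
      omega
    · have hih := ih h
      by_cases hpx : p x = true
      · simp [hpx, hmono x hpx]; omega
      · simp only [Bool.not_eq_true] at hpx
        by_cases hqx : q x = true <;> simp [hpx, hqx] <;> omega

theorem pvSet_add_of_not_mem {α : Type} [BEq α] [LawfulBEq α] (s : PySem.Set α) (c : α)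
    (h : c ∉ s) : PySem.Set.add s c = s ++ [c] := by
  simp [PySem.Set.add]
  exact h

theorem pvMem_cells (R C row col : Int) (h1 : 0 ≤ row) (h2 : row < R) (h3 : 0 ≤ col)
    (h4 : col < C) : (row, col) ∈ pvCells R C := by
  simp [pvCells, Prod.ext_iff]
  exact ⟨⟨row.toNat, by omega, by omega⟩, ⟨col.toNat, by omega, by omega⟩⟩

theorem pvUnvis_add_lt (R C : Int) (visited : PySem.Set (Int × Int)) (row col : Int)
    (h1 : 0 ≤ row) (h2 : row < R) (h3 : 0 ≤ col) (h4 : col < C)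
    (h5 : (row, col) ∉ visited) :
    pvUnvis R C (PySem.Set.add visited (row, col)) < pvUnvis R C visited := by
  unfold pvUnvis
  apply pvCountP_lt _ _ _ ?mono (row, col) (pvMem_cells R C row col h1 h2 h3 h4) ?hq ?hp
  case mono =>
    intro x
    simp only [decide_eq_true_eq]
    intro hx hm
    apply hx
    simp only [PySem.Set.add]
    split
    · exact hm
    · exact List.mem_append_left _ hm
  case hq => simp [h5]
  case hp =>
    rw [pvSet_add_of_not_mem _ _ h5]
    simp

-- the while loop: pop, guard, push the four neighbours reversed (Left, Down, Right, Up)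
def pvLoopB (matrix : List (List Int)) (ROWS COLS : Int) :
    List (Int × Int) → PySem.Set (Int × Int) → List Int → List Int
  | [], _, values => values
  | (row, col) :: rest, visited, values =>
    if h : row < 0 ∨ ROWS ≤ row ∨ col < 0 ∨ COLS ≤ col ∨ (row, col) ∈ visited then
      pvLoopB matrix ROWS COLS rest visited values
    else
      pvLoopB matrix ROWS COLS
        ((row - 1, col) :: (row, col + 1) :: (row + 1, col) :: (row, col - 1) :: rest)
        (PySem.Set.add visited (row, col))
        (values ++ [PySem.List.pyGetD (PySem.List.pyGetD matrix row []) col 0])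
  termination_by stack visited _ => 4 * pvUnvis ROWS COLS visited + stack.length
  decreasing_by
  · simp
  · push_neg at h
    obtain ⟨g1, g2, g3, g4, g5⟩ := h
    have := pvUnvis_add_lt ROWS COLS visited row col g1 g2 g3 g4 g5
    simp
    omega

def dfs2DTraversal_alt (matrix : List (List Int)) : List Int :=
  let ROWS : Int := matrix.length
  let COLS : Int := (PySem.List.pyGetD matrix 0 []).length
  pvLoopB matrix ROWS COLS [(0, 0)] PySem.Set.empty []

-- ===== PRECONDITION & SPEC =====
-- Pre_ excludes exactly the inputs where Python A raises IndexError: the empty matrix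
-- (matrix[0]) and, when the first row is nonempty, any row shorter than the first row
-- (the DFS from (0,0) visits every cell, so every row is indexed at every column < COLS).
def Pre_dfs2DTraversal (matrix : List (List Int)) : Prop :=
  matrix ≠ [] ∧
    ((PySem.List.pyGetD matrix 0 []).length = 0 ∨
      ∀ r ∈ matrix, (PySem.List.pyGetD matrix 0 []).length ≤ r.length)
instance (matrix : List (List Int)) : Decidable (Pre_dfs2DTraversal matrix) := by
  unfold Pre_dfs2DTraversal; infer_instance

def pvWitness_dfs2DTraversal : List (List Int) := [[1, 2], [3, 4]]

def Spec_dfs2DTraversal (matrix : List (List Int)) (out : List Int) : Prop :=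
  out = dfs2DTraversal_alt matrix
instance (matrix : List (List Int)) (out : List Int) : Decidable (Spec_dfs2DTraversal matrix out) := by
  unfold Spec_dfs2DTraversal; infer_instance

-- ===== CLAIM (what is proved, stated in full; the proofs are below) =====
def Claim_equal_dfs2DTraversal : Prop := ∀ (matrix : List (List Int)), Dom_dfs2DTraversal matrix → Pre_dfs2DTraversal matrix → Spec_dfs2DTraversal matrix (dfs2DTraversal matrix)

-- ===== LEMMAS AND PROOFS =====

theorem pvDfsA_mem_mono (matrix : List (List Int)) (R C : Int) :
    ∀ (f : Nat) (row col : Int) (st : PySem.Set (Int × Int) × List Int) (p : Int × Int),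
      p ∈ st.1 → p ∈ (pvDfsA matrix R C f row col st).1 := by
  intro f
  induction f with
  | zero => intro row col st p hp; simpa [pvDfsA] using hp
  | succ g ih =>
    intro row col st p hp
    rw [pvDfsA]
    split
    · exact hp
    · simp only [pvDirs, List.foldl]
      apply ih; apply ih; apply ih; apply ih
      simp only [PySem.Set.add]
      split
      · exact hp
      · simp [hp]

theorem pvUnvis_mono (R C : Int) (v1 v2 : PySem.Set (Int × Int))
    (h : ∀ p, p ∈ v1 → p ∈ v2) : pvUnvis R C v2 ≤ pvUnvis R C v1 := by
  unfold pvUnvis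
  apply List.countP_mono_left
  intro x _
  simp only [decide_eq_true_eq]
  exact fun hx hm => hx (h x hm)

theorem pvDfsA_unvis_le (matrix : List (List Int)) (R C : Int) (f : Nat) (row col : Int)
    (st : PySem.Set (Int × Int) × List Int) :
    pvUnvis R C (pvDfsA matrix R C f row col st).1 ≤ pvUnvis R C st.1 :=
  pvUnvis_mono R C _ _ (pvDfsA_mem_mono matrix R C f row col st)

theorem pvBridge (matrix : List (List Int)) (R C : Int) :
    ∀ (f : Nat) (row col : Int) (vis : PySem.Set (Int × Int)) (vals : List Int)
      (rest : List (Int × Int)),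
      pvUnvis R C vis < f →
      pvLoopB matrix R C ((row, col) :: rest) vis vals =
        pvLoopB matrix R C rest (pvDfsA matrix R C f row col (vis, vals)).1
          (pvDfsA matrix R C f row col (vis, vals)).2 := by
  intro f
  induction f with
  | zero => intro _ _ _ _ _ h; omega
  | succ g ih =>
    intro row col vis vals rest hlt
    rw [pvLoopB, pvDfsA]
    by_cases hg : row < 0 ∨ R ≤ row ∨ col < 0 ∨ C ≤ col ∨ (row, col) ∈ vis
    · rw [dif_pos hg, if_pos hg]
    · rw [dif_neg hg, if_neg hg]
      push_neg at hg
      obtain ⟨g1, g2, g3, g4, g5⟩ := hg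
      simp only [pvDirs, List.foldl]
      have h0 : pvUnvis R C (PySem.Set.add vis (row, col)) < g := by
        have := pvUnvis_add_lt R C vis row col g1 g2 g3 g4 g5
        omega
      have e0 : ((row : Int) - 1, (col : Int)) = (row + -1, col + 0) := by ring_nf
      have e1 : ((row : Int), (col : Int) + 1) = (row + 0, col + 1) := by ring_nf
      have e2 : ((row : Int) + 1, (col : Int)) = (row + 1, col + 0) := by ring_nf
      have e3 : ((row : Int), (col : Int) - 1) = (row + 0, col + -1) := by ring_nf
      rw [e0, ih (row + -1) (col + 0) (PySem.Set.add vis (row, col))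
        (vals ++ [PySem.List.pyGetD (PySem.List.pyGetD matrix row []) col 0]) _ h0]
      set S1 := pvDfsA matrix R C g (row + -1) (col + 0)
        (PySem.Set.add vis (row, col),
         vals ++ [PySem.List.pyGetD (PySem.List.pyGetD matrix row []) col 0]) with hS1
      have c1 : pvUnvis R C S1.1 < g := by
        rw [hS1]; exact lt_of_le_of_lt (pvDfsA_unvis_le _ _ _ _ _ _ _) h0
      rw [e1, ih (row + 0) (col + 1) S1.1 S1.2 _ c1]
      simp only [Prod.mk.eta]
      set S2 := pvDfsA matrix R C g (row + 0) (col + 1) S1 with hS2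
      have c2 : pvUnvis R C S2.1 < g := by
        rw [hS2]; exact lt_of_le_of_lt (pvDfsA_unvis_le _ _ _ _ _ _ _) c1
      rw [e2, ih (row + 1) (col + 0) S2.1 S2.2 _ c2]
      simp only [Prod.mk.eta]
      set S3 := pvDfsA matrix R C g (row + 1) (col + 0) S2 with hS3
      have c3 : pvUnvis R C S3.1 < g := by
        rw [hS3]; exact lt_of_le_of_lt (pvDfsA_unvis_le _ _ _ _ _ _ _) c2
      rw [e3, ih (row + 0) (col + -1) S3.1 S3.2 _ c3]

theorem pvCells_length (R C : Int) : (pvCells R C).length = R.toNat * C.toNat := by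
  simp [pvCells, List.length_flatMap, Function.comp]

theorem pvUnvis_empty (R C : Int) : pvUnvis R C PySem.Set.empty = R.toNat * C.toNat := by
  rw [← pvCells_length R C]
  unfold pvUnvis
  rw [List.countP_eq_length.mpr]
  intro x _
  simp [PySem.Set.empty]

-- ===== VERDICT (by name: the statement is the Claim_ definition above) =====
theorem dfs2DTraversal_spec : Claim_equal_dfs2DTraversal := by
  intro matrix _ _
  unfold Spec_dfs2DTraversal dfs2DTraversal dfs2DTraversal_alt
  have hfuel : pvUnvis (matrix.length : Int) ((PySem.List.pyGetD matrix 0 []).length : Int)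
      PySem.Set.empty < matrix.length * (PySem.List.pyGetD matrix 0 []).length + 1 := by
    rw [pvUnvis_empty]
    simp
  rw [pvBridge matrix _ _ _ 0 0 PySem.Set.empty [] [] hfuel]
  rw [pvLoopB]
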